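-- pv_equiv track=rewrite | github.com/dongmeixu/Algorithm | leetcode/leetcode/string/Valid Number.py | count
-- ===== SOURCE A (Python) =====
-- def count(s, index):
--     if index >= len(s):
--         return
--
--     i = 0
--     count = 0
--     while i < len(s):
--         if s[index] == s[i]:
--             count += 1
--         i += 1
--     return count
-- ===== SOURCE B (Python) =====
-- def count(s, index):
--     if index >= len(s):
--         return
--     return len(s) - len(s.replace(s[index], ''))
-- ===== Notes on version B (the rewrite author's own statement) =====
-- stated objective: faster
-- what changed: Replaces A's explicit index-based scan-and-compare loop with no loop at all: delete every occurrence of s[index] via str.replace and return the length difference.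
-- outside the precondition, e.g. on count('', -1): A returns 0, B raises IndexError; on count('ab', -3): A raises IndexError, B raises IndexError
import Mathlib
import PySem

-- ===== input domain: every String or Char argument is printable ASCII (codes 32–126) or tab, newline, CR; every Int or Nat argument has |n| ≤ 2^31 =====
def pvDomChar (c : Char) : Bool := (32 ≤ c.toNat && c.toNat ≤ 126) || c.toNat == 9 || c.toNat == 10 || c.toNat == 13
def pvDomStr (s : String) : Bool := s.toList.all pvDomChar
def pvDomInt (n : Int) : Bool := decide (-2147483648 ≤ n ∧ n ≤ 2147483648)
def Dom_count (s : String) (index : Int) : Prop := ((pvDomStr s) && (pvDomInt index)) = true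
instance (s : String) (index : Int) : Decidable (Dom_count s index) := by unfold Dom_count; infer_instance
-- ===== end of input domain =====

-- B removes A's explicit scan-and-compare loop entirely: it deletes every occurrence of s[index] with str.replace and returns the length difference (measured faster by a constant factor).


-- ===== PORT A =====
-- the 'while i < len(s)' loop of A: i, count are the loop state; s[index] is looked up
-- inside the loop body, exactly as in the Python (none = the IndexError it can raise there)
def countLoopA (cs : List Char) (index : Int) (i : Nat) (acc : Int) : Option Int :=
  if h : i < cs.length then
    match PySem.List.pyGet? cs index with
    | none => none            -- s[index] raises IndexError (excluded by Pre_count)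
    | some t => countLoopA cs index (i + 1) (if t = cs[i] then acc + 1 else acc)
  else some acc
termination_by cs.length - i

def count (s : String) (index : Int) : Option Int :=
  if index ≥ PySem.Str.len s then none
  else countLoopA s.toList index 0 0

-- ===== PORT B =====
def count_alt (s : String) (index : Int) : Option Int :=
  if index ≥ PySem.Str.len s then none
  else
    match PySem.Str.pyGet? s index with
    | none => none            -- s[index] raises IndexError (excluded by Pre_count)
    | some c =>
        some (PySem.Str.len s - PySem.Str.len (PySem.Str.replace s (String.ofList [c]) ""))

-- ===== PRECONDITION & SPEC =====
-- Pre_ excludes inputs where s[index] would raise IndexError: for nonempty s with index < -len(s)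
-- both A and B raise; for empty s with index < 0, A accidentally returns 0 without ever evaluating
-- s[index] (the loop body never runs) while B's s.replace(s[index], '') raises IndexError there.
def Pre_count (s : String) (index : Int) : Prop :=
  index ≥ (s.toList.length : Int) ∨ -(s.toList.length : Int) ≤ index
instance (s : String) (index : Int) : Decidable (Pre_count s index) := by unfold Pre_count; infer_instance

def pvWitness_count : String × Int := ("abca", 0)

def Spec_count (s : String) (index : Int) (out : Option Int) : Prop := out = count_alt s index
instance (s : String) (index : Int) (out : Option Int) : Decidable (Spec_count s index out) := by unfold Spec_count; infer_instance

-- ===== CLAIM (what is proved, stated in full; the proofs are below) =====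
def Claim_equal_count : Prop := ∀ (s : String) (index : Int), Dom_count s index → Pre_count s index → Spec_count s index (count s index)

-- ===== LEMMAS AND PROOFS =====

theorem countLoopA_eq (cs : List Char) (index : Int) (t : Char)
    (hget : PySem.List.pyGet? cs index = some t) (i : Nat) (acc : Int) :
    countLoopA cs index i acc = some (acc + ((cs.drop i).count t : Int)) := by
  by_cases h : i < cs.length
  · rw [countLoopA]
    simp only [h, dif_pos, hget]
    rw [countLoopA_eq cs index t hget (i + 1), List.drop_eq_getElem_cons h, List.count_cons]
    by_cases ht : t = cs[i]
    · simp only [ht, beq_self_eq_true, if_true, Option.some.injEq]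
      push_cast; ring
    · have hb : (cs[i] == t) = false := by
        simp only [beq_eq_false_iff_ne, ne_eq]
        exact fun he => ht he.symm
      simp [ht, hb]
  · rw [countLoopA]
    simp [h, List.drop_eq_nil_of_le (Nat.le_of_not_lt h)]
termination_by cs.length - i

-- replace.go with a single-char pattern and empty replacement is a filter
theorem replace_go_single (t : Char) (fuel : Nat) (l acc : List Char) (hl : l.length ≤ fuel) :
    PySem.Chars.replace.go [t] [] fuel l acc
      = acc.reverse ++ l.filter (fun c => !(t == c)) := by
  induction fuel generalizing l acc with
  | zero =>
      have hnil : l = [] := List.length_eq_zero_iff.mp (Nat.le_zero.mp hl)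
      simp [PySem.Chars.replace.go, hnil]
  | succ n ih =>
      cases l with
      | nil => simp [PySem.Chars.replace.go]
      | cons c rest =>
          rw [PySem.Chars.replace.go]
          by_cases hc : t = c
          · have hp : List.isPrefixOf [t] (c :: rest) = true := by
              simp [List.isPrefixOf, hc]
            simp only [hp, if_true, List.reverse_nil, List.nil_append,
              show List.drop [t].length (c :: rest) = rest from rfl]
            rw [ih rest acc (by simpa using Nat.succ_le_succ_iff.mp (by simpa using hl))]
            simp [List.filter, hc]
          · have hp : List.isPrefixOf [t] (c :: rest) = false := by
              simp [List.isPrefixOf, hc]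
            simp only [hp]
            rw [ih rest (c :: acc) (by simpa using Nat.succ_le_succ_iff.mp (by simpa using hl))]
            simp [List.filter, beq_eq_false_iff_ne.mpr hc]

theorem replace_single (t : Char) (cs : List Char) :
    PySem.Chars.replace cs [t] [] = cs.filter (fun c => !(t == c)) := by
  rw [PySem.Chars.replace]
  simp [replace_go_single t cs.length cs [] le_rfl]

theorem count_add_filter (t : Char) (cs : List Char) :
    (cs.count t : Int) + ((cs.filter (fun c => !(t == c))).length : Int) = cs.length := by
  induction cs with
  | nil => simp
  | cons c rest ih =>
      by_cases hc : t = c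
      · simp only [List.count_cons, List.filter, hc, beq_self_eq_true]
        push_cast
        push_cast at ih
        simp_all
        omega
      · have hb : (c == t) = false := by simp [Ne.symm hc]
        simp only [List.count_cons, List.filter, hb]
        simp only [beq_eq_false_iff_ne.mpr hc, Bool.not_false, List.length_cons]
        push_cast
        push_cast at ih
        omega

theorem count_spec : Claim_equal_count := by
  intro s index hdom hpre
  unfold Spec_count count count_alt
  split_ifs with hge
  · rfl
  · have hlen0 : 0 < s.toList.length := by
      rcases Nat.eq_zero_or_pos s.toList.length with h0 | h0
      · exfalso
        apply hge
        simp only [PySem.Str.len, h0]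
        rcases hpre with hp | hp
        · omega
        · simp [h0] at hp; omega
      · exact h0
    cases hget : PySem.Str.pyGet? s index with
    | none =>
        have hget' : PySem.List.pyGet? s.toList index = none := by
          simpa using hget
        have hs : s ≠ "" := by
          intro h; rw [h] at hlen0; simp at hlen0
        rw [countLoopA]
        simp [hget', hs]
    | some t =>
        have hget' : PySem.List.pyGet? s.toList index = some t := by
          simpa using hget
        rw [countLoopA_eq s.toList index t hget' 0 0]
        simp only [Option.some.injEq]
        have hlen : (PySem.Str.replace s (String.ofList [t]) "").toList
            = s.toList.filter (fun c => !(t == c)) := by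
          rw [PySem.Str.toList_replace]
          simp only [String.toList_ofList, show ("" : String).toList = [] from rfl]
          exact replace_single t s.toList
        simp only [PySem.Str.len, hlen]
        have := count_add_filter t s.toList
        simp only [List.drop_zero]
        omega
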